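-- pv_equiv track=rewrite | github.com/hoootan/ocd | src/ocd/providers/remote_api.py | _parse_script_response
-- ===== SOURCE A (Python) =====
-- from typing import Any, Dict, List, Optional
--
-- def _parse_script_response(content: str) -> Dict[str, Any]:
--     """Parse script generation response."""
--     lines = content.split("\n")
--     script_lines = []
--     description = ""
--
--     in_script = False
--     for line in lines:
--         if line.strip().startswith("#!/"):
--             in_script = True
--
--         if in_script:
--             script_lines.append(line)
--         elif not description and line.strip():
--             description = line.strip()
--
--     return {
--         "script": "\n".join(script_lines) if script_lines else content,
--         "description": description,
--         "language": "bash",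
--     }
-- ===== SOURCE B (Python) =====
-- def _parse_script_response(content: str):
--     """Parse script generation response (find-split-point-then-slice)."""
--     lines = content.split("\n")
--     idx = next((i for i, line in enumerate(lines)
--                 if line.strip().startswith("#!/")), None)
--     pre = lines if idx is None else lines[:idx]
--     description = next((l.strip() for l in pre if l.strip()), "")
--     script_lines = [] if idx is None else lines[idx:]
--     return {
--         "script": "\n".join(script_lines) if script_lines else content,
--         "description": description,
--         "language": "bash",
--     }
-- ===== Notes on version B (the rewrite author's own statement) =====
-- stated objective: simpler
-- what changed: Replaces the stateful in_script flag loop with a find-split-point-then-slice decomposition: locate the first shebang line index, slice the script tail, and take the first non-empty stripped line of the prefix as the description.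
import Mathlib
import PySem

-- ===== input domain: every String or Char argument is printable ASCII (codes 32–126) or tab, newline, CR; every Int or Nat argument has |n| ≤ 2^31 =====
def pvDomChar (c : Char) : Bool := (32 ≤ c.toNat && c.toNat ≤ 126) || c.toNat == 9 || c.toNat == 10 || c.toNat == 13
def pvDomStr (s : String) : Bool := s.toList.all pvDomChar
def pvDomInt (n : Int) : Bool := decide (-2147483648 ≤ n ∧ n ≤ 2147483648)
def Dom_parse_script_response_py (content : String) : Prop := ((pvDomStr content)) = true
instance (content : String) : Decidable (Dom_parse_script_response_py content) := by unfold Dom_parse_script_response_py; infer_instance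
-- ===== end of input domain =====

-- B replaces A's stateful in_script flag loop by a find-the-shebang-index-then-slice decomposition (objective: simpler).

-- shared tiny predicate: line.strip().startswith("#!/")
def pvShebang (line : String) : Bool := PySem.Str.startswith (PySem.Str.strip line) "#!/"

-- content.split("\n"): the separator is the non-empty literal "\n", so split? is always `some`
def pvLines (content : String) : List String := (PySem.Str.split? content "\n").getD []

-- ===== PORT A =====
-- one step of A's for-loop; state = (script_lines, description, in_script)
def pvAStep (st : List String × String × Bool) (line : String) : List String × String × Bool :=
  let ins := st.2.2 || pvShebang line
  if ins then (st.1 ++ [line], st.2.1, ins)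
  else if st.2.1 == "" && PySem.Str.strip line != "" then (st.1, PySem.Str.strip line, ins)
  else (st.1, st.2.1, ins)

def parse_script_response_py (content : String) : List (String × String) :=
  let lines := pvLines content
  let r := lines.foldl pvAStep ([], "", false)
  [("script", if r.1.isEmpty then content else PySem.Str.join "\n" r.1),
   ("description", r.2.1),
   ("language", "bash")]

-- ===== PORT B =====
-- next((l.strip() for l in pre if l.strip()), "")
def pvFirstNE (l : List String) : String :=
  match l.find? (fun s => PySem.Str.strip s != "") with
  | some s => PySem.Str.strip s
  | none => ""

def parse_script_response_py_alt (content : String) : List (String × String) :=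
  let lines := pvLines content
  let idx? := lines.findIdx? pvShebang
  let pre := match idx? with | none => lines | some i => lines.take i
  let description := pvFirstNE pre
  let script_lines := match idx? with | none => ([] : List String) | some i => lines.drop i
  [("script", if script_lines.isEmpty then content else PySem.Str.join "\n" script_lines),
   ("description", description),
   ("language", "bash")]

-- ===== PRECONDITION & SPEC =====
def Spec_parse_script_response_py (content : String) (out : List (String × String)) : Prop := out = parse_script_response_py_alt content
instance (content : String) (out : List (String × String)) : Decidable (Spec_parse_script_response_py content out) := by unfold Spec_parse_script_response_py; infer_instance

-- ===== CLAIM (what is proved, stated in full; the proofs are below) =====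
def Claim_equal_parse_script_response_py : Prop := ∀ (content : String), Dom_parse_script_response_py content → Spec_parse_script_response_py content (parse_script_response_py content)

-- ===== LEMMAS AND PROOFS =====

-- once in_script is true, A appends every remaining line and never touches description
theorem pv_loopTrue (l : List String) (acc : List String) (d : String) :
    l.foldl pvAStep (acc, d, true) = (acc ++ l, d, true) := by
  induction l generalizing acc with
  | nil => simp
  | cons h t ih => simp [pvAStep, ih]

-- one description step equals prepending the line to the prefix searched by B
theorem pv_desc_step (d h : String) (l' : List String) :
    (if (if d == "" && PySem.Str.strip h != "" then PySem.Str.strip h else d) = ""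
       then pvFirstNE l'
       else (if d == "" && PySem.Str.strip h != "" then PySem.Str.strip h else d))
    = if d = "" then pvFirstNE (h :: l') else d := by
  by_cases hd : d = "" <;> by_cases hh : PySem.Str.strip h = ""
  · simp [pvFirstNE, hd, hh, List.find?]
  · have ht : (PySem.Str.strip h != "") = true := by simp [hh]
    simp [pvFirstNE, hd, hh, List.find?, ht]
  · simp [hd, hh]
  · have ht : (PySem.Str.strip h != "") = true := by simp [hh]
    simp [hd, ht]

-- the two shapes of one loop step of A from the not-yet-in-script state
theorem pvAStep_true (d h : String) (hs : pvShebang h = true) :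
    pvAStep ([], d, false) h = ([h], d, true) := by simp [pvAStep, hs]

theorem pvAStep_false (d h : String) (hs : pvShebang h = false) :
    pvAStep ([], d, false) h =
      ([], if d == "" && PySem.Str.strip h != "" then PySem.Str.strip h else d, false) := by
  simp [pvAStep, hs]
  split <;> simp_all

-- characterisation of A's loop from the initial (not yet in script) state
theorem pv_loopFalse (l : List String) (d : String) :
    l.foldl pvAStep ([], d, false) =
      match l.findIdx? pvShebang with
      | some i => (l.drop i, if d = "" then pvFirstNE (l.take i) else d, true)
      | none => ([], if d = "" then pvFirstNE l else d, false) := by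
  induction l generalizing d with
  | nil => by_cases hd : d = "" <;> simp [pvFirstNE, hd]
  | cons h t ih =>
    by_cases hs : pvShebang h = true
    · rw [List.foldl_cons, pvAStep_true d h hs, pv_loopTrue]
      by_cases hd : d = "" <;> simp [List.findIdx?_cons, pvFirstNE, hd, hs]
    · have hs' : pvShebang h = false := by simpa using hs
      rw [List.foldl_cons, pvAStep_false d h hs', ih]
      cases hfi : t.findIdx? pvShebang with
      | some j =>
        simp only [List.findIdx?_cons, hs', Bool.false_eq_true, if_false, hfi, Option.map_some,
          List.drop_succ_cons, List.take_succ_cons]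
        rw [← pv_desc_step d h (t.take j)]
      | none =>
        simp only [List.findIdx?_cons, hs', Bool.false_eq_true, if_false, hfi, Option.map_none]
        rw [← pv_desc_step d h t]

-- ===== VERDICT (by name: the statement is the Claim_ definition above) =====
theorem parse_script_response_py_spec : Claim_equal_parse_script_response_py := by
  intro content _
  unfold Spec_parse_script_response_py parse_script_response_py parse_script_response_py_alt
  dsimp only
  rw [pv_loopFalse]
  cases h : (pvLines content).findIdx? pvShebang <;> simp [pvFirstNE]
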